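-- pv_equiv track=rewrite | github.com/aurelienbran/technicia-mvp | services/schema-analyzer/main.py | _is_technical_diagram
-- ===== SOURCE A (Python) =====
-- from typing import Dict, List, Any, Optional
--
-- def _is_technical_diagram(labels: List[str], text: str) -> bool:
--     """
--     Détermine si l'image est un schéma technique.
--
--     Args:
--         labels: Liste des étiquettes détectées
--         text: Texte détecté dans l'image
--
--     Returns:
--         True si c'est un schéma technique, False sinon
--     """
--     # Indicateurs de schémas techniques
--     technical_indicators = [
--         "diagram", "schematic", "blueprint", "technical drawing", "circuit",
--         "plan", "design", "drawing", "schematics", "technical", "engineering"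
--     ]
--
--     # Vérifier dans les étiquettes
--     if any(indicator in label for label in labels for indicator in technical_indicators):
--         return True
--
--     # Vérifier dans le texte
--     text_lower = text.lower()
--     if any(indicator in text_lower for indicator in technical_indicators):
--         return True
--
--     return False
-- ===== SOURCE B (Python) =====
-- # Single-pass multi-pattern matcher: instead of running a separate substring
-- # search per keyword, scan each string once left to right, keeping the set of
-- # keyword tails still pending after a partial match (an NFA simulation).
-- _INDICATORS = [
--     "diagram", "schematic", "blueprint", "technical drawing", "circuit",
--     "plan", "design", "drawing", "schematics", "technical", "engineering",
-- ]
--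
--
-- def _contains_keyword(s):
--     pending = []
--     for ch in s:
--         pending = [t[1:] for t in pending + _INDICATORS if t[:1] == ch]
--         if "" in pending:
--             return True
--     return False
--
--
-- def _is_technical_diagram(labels, text):
--     return any(map(_contains_keyword, labels)) or _contains_keyword(text.lower())
-- ===== Notes on version B (the rewrite author's own statement) =====
-- stated objective: alternative
-- what changed: B replaces A's eleven independent substring scans per string by a single left-to-right pass per string that simulates an NFA: it carries the list of not-yet-consumed tails of partially matched keywords and reports a match when a tail empties.
import Mathlib
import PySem

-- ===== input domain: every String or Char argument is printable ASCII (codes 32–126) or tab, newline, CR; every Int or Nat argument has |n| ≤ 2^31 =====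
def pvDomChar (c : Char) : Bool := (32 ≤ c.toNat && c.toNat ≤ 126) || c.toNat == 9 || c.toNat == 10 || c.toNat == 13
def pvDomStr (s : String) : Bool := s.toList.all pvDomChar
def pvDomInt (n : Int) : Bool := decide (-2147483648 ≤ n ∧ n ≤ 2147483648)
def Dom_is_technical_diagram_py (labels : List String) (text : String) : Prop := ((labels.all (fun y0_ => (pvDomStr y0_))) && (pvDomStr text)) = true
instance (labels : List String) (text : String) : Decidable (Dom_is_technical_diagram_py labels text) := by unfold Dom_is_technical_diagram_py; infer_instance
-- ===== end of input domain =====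

-- B replaces A's per-keyword substring scans by a single left-to-right pass per
-- string that maintains the pending tails of partially matched keywords (an NFA
-- simulation); objective: alternative.


-- ===== PORT A =====
-- A's keyword list, in A's order
def pvIndicatorsA : List String :=
  ["diagram", "schematic", "blueprint", "technical drawing", "circuit",
   "plan", "design", "drawing", "schematics", "technical", "engineering"]

def is_technical_diagram_py (labels : List String) (text : String) : Bool :=
  -- any(indicator in label for label in labels for indicator in technical_indicators)
  if labels.any (fun label => pvIndicatorsA.any (fun ind => PySem.Str.isIn ind label)) then
    true
  else
    let text_lower := PySem.Str.lower text
    if pvIndicatorsA.any (fun ind => PySem.Str.isIn ind text_lower) then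
      true
    else
      false

-- ===== PORT B =====
-- B's _INDICATORS, as lists of chars (B manipulates its keywords char by char)
def pvIndicatorsB : List (List Char) :=
  ["diagram".toList, "schematic".toList, "blueprint".toList,
   "technical drawing".toList, "circuit".toList, "plan".toList,
   "design".toList, "drawing".toList, "schematics".toList,
   "technical".toList, "engineering".toList]

-- pending = [t[1:] for t in pending + _INDICATORS if t[:1] == ch]
-- (t[:1] == ch compares the first character, handling empty t; exact here since
--  all strings are modeled as their char lists)
def pvNfaStep (pending : List (List Char)) (ch : Char) : List (List Char) :=
  ((pending ++ pvIndicatorsB).filter (fun t => t.take 1 = [ch])).map (List.drop 1)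

-- the 'for ch in s' loop of _contains_keyword with its early return
def pvScan : List Char → List (List Char) → Bool
  | [], _ => false
  | ch :: rest, pending =>
      let p := pvNfaStep pending ch
      if ([] : List Char) ∈ p then true else pvScan rest p

def pvContainsKeyword (s : List Char) : Bool := pvScan s []

def is_technical_diagram_py_alt (labels : List String) (text : String) : Bool :=
  labels.any (fun s => pvContainsKeyword s.toList)
    || pvContainsKeyword (PySem.Str.lower text).toList

-- ===== PRECONDITION & SPEC =====
def Spec_is_technical_diagram_py (labels : List String) (text : String) (out : Bool) : Prop := out = is_technical_diagram_py_alt labels text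
instance (labels : List String) (text : String) (out : Bool) : Decidable (Spec_is_technical_diagram_py labels text out) := by unfold Spec_is_technical_diagram_py; infer_instance

-- ===== CLAIM (what is proved, stated in full; the proofs are below) =====
def Claim_equal_is_technical_diagram_py : Prop := ∀ (labels : List String) (text : String), Dom_is_technical_diagram_py labels text → Spec_is_technical_diagram_py labels text (is_technical_diagram_py labels text)

-- ===== LEMMAS AND PROOFS =====

-- a nonempty list is a prefix of ch :: rest iff its head is ch and its tail is a prefix of rest
lemma prefix_cons_char (t : List Char) (ch : Char) (rest : List Char) :
    (t ≠ [] ∧ t <+: ch :: rest) ↔ (t.take 1 = [ch] ∧ t.drop 1 <+: rest) := by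
  cases t with
  | nil => simp
  | cons a t' => simp [List.cons_prefix_cons, eq_comm]

-- NFA invariant: the scan succeeds iff some pending tail completes as a prefix,
-- or some keyword occurs as an infix
lemma pvScan_iff (cs : List Char) (P : List (List Char)) :
    pvScan cs P = true ↔
      (∃ t ∈ P, t ≠ [] ∧ t <+: cs) ∨ (∃ k ∈ pvIndicatorsB, k ≠ [] ∧ k <:+: cs) := by
  induction cs generalizing P with
  | nil =>
    simp only [pvScan, Bool.false_eq_true, false_iff]
    rintro (⟨t, _, htne, htp⟩ | ⟨k, _, hkne, hki⟩)
    · exact htne (List.prefix_nil.mp htp)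
    · exact hkne (List.infix_nil.mp hki)
  | cons ch rest ih =>
    have hmem : ∀ t' : List Char, t' ∈ pvNfaStep P ch ↔
        ∃ t ∈ P ++ pvIndicatorsB, t.take 1 = [ch] ∧ t' = t.drop 1 := by
      intro t'
      simp only [pvNfaStep, List.mem_map, List.mem_filter, decide_eq_true_eq]
      constructor
      · rintro ⟨t, ⟨htm, hh⟩, rfl⟩; exact ⟨t, htm, hh, rfl⟩
      · rintro ⟨t, htm, hh, rfl⟩; exact ⟨t, ⟨htm, hh⟩, rfl⟩
    show (if ([] : List Char) ∈ pvNfaStep P ch then true else pvScan rest (pvNfaStep P ch)) = true ↔ _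
    by_cases hnil : ([] : List Char) ∈ pvNfaStep P ch
    · simp only [hnil, if_pos, true_iff]
      obtain ⟨t, htm, hh, hd⟩ := (hmem []).mp hnil
      have hpre : t ≠ [] ∧ t <+: ch :: rest :=
        (prefix_cons_char t ch rest).mpr ⟨hh, by rw [← hd]; exact List.nil_prefix⟩
      rcases List.mem_append.mp htm with h | h
      · exact Or.inl ⟨t, h, hpre⟩
      · exact Or.inr ⟨t, h, hpre.1, hpre.2.isInfix⟩
    · simp only [hnil, if_neg, not_false_iff, ih]
      constructor
      · rintro (⟨t', ht'm, ht'ne, ht'p⟩ | ⟨k, hk, hkne, hki⟩)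
        · obtain ⟨t, htm, hh, rfl⟩ := (hmem t').mp ht'm
          have hpre : t ≠ [] ∧ t <+: ch :: rest :=
            (prefix_cons_char t ch rest).mpr ⟨hh, ht'p⟩
          rcases List.mem_append.mp htm with h | h
          · exact Or.inl ⟨t, h, hpre⟩
          · exact Or.inr ⟨t, h, hpre.1, hpre.2.isInfix⟩
        · exact Or.inr ⟨k, hk, hkne, hki.trans (List.suffix_cons ch rest).isInfix⟩
      · rintro (⟨t, htm, htne, htp⟩ | ⟨k, hk, hkne, hki⟩)
        · obtain ⟨hh, hd⟩ := (prefix_cons_char t ch rest).mp ⟨htne, htp⟩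
          have h1 : t.drop 1 ∈ pvNfaStep P ch :=
            (hmem _).mpr ⟨t, List.mem_append.mpr (Or.inl htm), hh, rfl⟩
          have h2 : t.drop 1 ≠ [] := fun he => hnil (he ▸ h1)
          exact Or.inl ⟨t.drop 1, h1, h2, hd⟩
        · rcases (List.infix_cons_iff).mp hki with hp | hi
          · obtain ⟨hh, hd⟩ := (prefix_cons_char k ch rest).mp ⟨hkne, hp⟩
            have h1 : k.drop 1 ∈ pvNfaStep P ch :=
              (hmem _).mpr ⟨k, List.mem_append.mpr (Or.inr hk), hh, rfl⟩
            have h2 : k.drop 1 ≠ [] := fun he => hnil (he ▸ h1)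
            exact Or.inl ⟨k.drop 1, h1, h2, hd⟩
          · exact Or.inr ⟨k, hk, hkne, hi⟩

-- every keyword of B is nonempty
lemma indicatorsB_ne_nil : ∀ k ∈ pvIndicatorsB, k ≠ [] := by decide

-- B's keyword char-lists are exactly A's keyword strings
lemma indicatorsB_eq : pvIndicatorsB = pvIndicatorsA.map String.toList := by decide

-- per-string: B's single pass agrees with A's per-keyword substring test
lemma containsKeyword_eq (s : String) :
    pvContainsKeyword s.toList = pvIndicatorsA.any (fun ind => PySem.Str.isIn ind s) := by
  rw [Bool.eq_iff_iff, pvContainsKeyword, pvScan_iff]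
  simp only [List.not_mem_nil, false_and, exists_false, false_or,
    List.any_eq_true, PySem.Str.isIn_eq, indicatorsB_eq, List.mem_map]
  constructor
  · rintro ⟨k, ⟨ind, hind, rfl⟩, _, hinf⟩
    exact ⟨ind, hind, (PySem.Chars.isIn_iff_infix _ _).mpr hinf⟩
  · rintro ⟨ind, hind, hIn⟩
    refine ⟨ind.toList, ⟨ind, hind, rfl⟩, ?_, (PySem.Chars.isIn_iff_infix _ _).mp hIn⟩
    have := indicatorsB_ne_nil ind.toList (by rw [indicatorsB_eq]; exact List.mem_map.mpr ⟨ind, hind, rfl⟩)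
    exact this

-- ===== VERDICT (by name: the statement is the Claim_ definition above) =====
theorem is_technical_diagram_py_spec : Claim_equal_is_technical_diagram_py := by
  intro labels text _
  show is_technical_diagram_py labels text = is_technical_diagram_py_alt labels text
  unfold is_technical_diagram_py is_technical_diagram_py_alt
  simp only [containsKeyword_eq]
  rcases Bool.eq_false_or_eq_true
      (labels.any (fun label => pvIndicatorsA.any (fun ind => PySem.Str.isIn ind label))) with
    h | h <;>
  rcases Bool.eq_false_or_eq_true
      (pvIndicatorsA.any (fun ind => PySem.Str.isIn ind (PySem.Str.lower text))) with
    h2 | h2 <;>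
  rw [h, h2] <;> simp
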